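-- pv_equiv track=rewrite | github.com/shuaizhao95/backdoor_attack_and_defense | t5/_utils.py | split_sentence
-- ===== SOURCE A (Python) =====
-- def split_sentence(sentence):
--     up_sentence = []
--     down_sentence = []
--     n = 0
--     for i in sentence:
--         if n < 1 and i != 2:
--             up_sentence.append(i)
--         else:
--             n += 1
--             down_sentence.append(i)
--     return up_sentence,down_sentence
-- ===== SOURCE B (Python) =====
-- def split_sentence(sentence):
--     seq = list(sentence)
--     idx = seq.index(2) if 2 in seq else len(seq)
--     return seq[:idx], seq[idx:]
-- ===== Notes on version B (the rewrite author's own statement) =====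
-- stated objective: simpler
-- what changed: Replaces the accumulating two-list loop with a mode flag by locating the first 2 (index or len) and slicing the list once at that position.
import Mathlib
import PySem

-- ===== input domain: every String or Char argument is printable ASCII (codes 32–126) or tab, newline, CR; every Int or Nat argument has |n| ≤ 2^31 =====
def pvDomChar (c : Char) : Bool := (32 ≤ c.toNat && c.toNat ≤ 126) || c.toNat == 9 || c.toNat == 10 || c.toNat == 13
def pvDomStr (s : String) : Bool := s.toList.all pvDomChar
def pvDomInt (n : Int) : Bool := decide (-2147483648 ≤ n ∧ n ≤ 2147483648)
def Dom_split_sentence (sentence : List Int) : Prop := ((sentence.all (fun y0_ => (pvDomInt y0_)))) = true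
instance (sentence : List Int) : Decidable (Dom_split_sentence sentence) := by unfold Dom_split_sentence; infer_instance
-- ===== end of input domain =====

-- B replaces A's accumulating two-list loop with a mode flag by one locate-then-slice: simpler decomposition, same O(n) cost.

-- ===== PORT A =====
-- the loop body of A (state: up_sentence, down_sentence, n)
def splitStepA (st : List Int × List Int × Int) (i : Int) : List Int × List Int × Int :=
  if st.2.2 < 1 ∧ i ≠ 2 then (st.1 ++ [i], st.2.1, st.2.2)
  else (st.1, st.2.1 ++ [i], st.2.2 + 1)

def split_sentence (sentence : List Int) : List Int × List Int :=
  let st := sentence.foldl splitStepA ([], [], 0)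
  (st.1, st.2.1)

-- ===== PORT B =====
def split_sentence_alt (sentence : List Int) : List Int × List Int :=
  let idx : Int :=
    match PySem.List.index? sentence 2 with
    | some i => (i : Int)
    | none => (sentence.length : Int)
  (PySem.List.slice sentence none (some idx), PySem.List.slice sentence (some idx) none)

-- ===== PRECONDITION & SPEC =====
def Spec_split_sentence (sentence : List Int) (out : List Int × List Int) : Prop := out = split_sentence_alt sentence
instance (sentence : List Int) (out : List Int × List Int) : Decidable (Spec_split_sentence sentence out) := by unfold Spec_split_sentence; infer_instance

-- ===== CLAIM (what is proved, stated in full; the proofs are below) =====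
def Claim_equal_split_sentence : Prop := ∀ (sentence : List Int), Dom_split_sentence sentence → Spec_split_sentence sentence (split_sentence sentence)

-- ===== LEMMAS AND PROOFS =====

-- once n ≥ 1, A's loop sends everything to down_sentence
theorem splitFold_sat (l : List Int) (up down : List Int) (n : Int) (hn : 1 ≤ n) :
    l.foldl splitStepA (up, down, n) = (up, down ++ l, n + l.length) := by
  induction l generalizing down n with
  | nil => simp
  | cons x xs ih =>
    have hx : ¬ (n < 1 ∧ x ≠ 2) := by rintro ⟨h, _⟩; omega
    simp only [List.foldl_cons, splitStepA, hx, if_false]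
    rw [ih (down ++ [x]) (n + 1) (by omega)]
    simp; omega

-- A's loop from the initial state computes takeWhile/dropWhile at the first 2
theorem splitFold_init (l : List Int) (up : List Int) :
    l.foldl splitStepA (up, [], 0) =
      (up ++ l.takeWhile (· ≠ 2), l.dropWhile (· ≠ 2), ((l.dropWhile (· ≠ 2)).length : Int)) := by
  induction l generalizing up with
  | nil => simp
  | cons x xs ih =>
    by_cases hx : x = 2
    · subst hx
      simp only [List.foldl_cons]
      rw [show splitStepA (up, [], 0) 2 = (up, [2], 1) by simp [splitStepA]]
      rw [splitFold_sat xs up [2] 1 (by norm_num)]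
      simp; omega
    · simp only [List.foldl_cons]
      rw [show splitStepA (up, [], 0) x = (up ++ [x], [], 0) by simp [splitStepA, hx]]
      rw [ih (up ++ [x])]
      simp [hx]

-- the split index B computes characterises takeWhile/dropWhile
theorem take_index_eq (l : List Int) :
    l.take ((PySem.List.index? l 2).getD l.length) = l.takeWhile (· ≠ 2) := by
  induction l with
  | nil => simp [PySem.List.index?]
  | cons x xs ih =>
    by_cases hx : x = 2
    · subst hx
      rw [PySem.List.index?_cons_self]
      simp
    · rw [PySem.List.index?_cons_of_ne xs hx]
      cases h : PySem.List.index? xs 2 with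
      | some k =>
        rw [h] at ih
        simp only [Option.map_some, Option.getD_some] at ih ⊢
        simp [List.take_succ_cons, hx, ih]
      | none =>
        rw [h] at ih
        simp only [Option.map_none, Option.getD_none] at ih ⊢
        rw [List.length_cons, List.take_succ_cons, List.takeWhile_cons_of_pos (by simp [hx])]
        rw [← ih]

theorem drop_index_eq (l : List Int) :
    l.drop ((PySem.List.index? l 2).getD l.length) = l.dropWhile (· ≠ 2) := by
  induction l with
  | nil => simp [PySem.List.index?]
  | cons x xs ih =>
    by_cases hx : x = 2
    · subst hx
      rw [PySem.List.index?_cons_self]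
      simp
    · rw [PySem.List.index?_cons_of_ne xs hx]
      cases h : PySem.List.index? xs 2 with
      | some k =>
        rw [h] at ih
        simp only [Option.map_some, Option.getD_some] at ih ⊢
        simp [List.drop_succ_cons, hx, ih]
      | none =>
        rw [h] at ih
        simp only [Option.map_none, Option.getD_none] at ih ⊢
        rw [List.length_cons, List.drop_succ_cons, List.dropWhile_cons_of_pos (by simp [hx])]
        exact ih

-- B computes the same takeWhile/dropWhile split
theorem alt_eq_splitAt (l : List Int) :
    split_sentence_alt l = (l.takeWhile (· ≠ 2), l.dropWhile (· ≠ 2)) := by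
  unfold split_sentence_alt
  cases h : PySem.List.index? l 2 with
  | some k =>
    simp only [PySem.List.slice_to_natCast, PySem.List.slice_from_natCast]
    rw [← take_index_eq, ← drop_index_eq, h]
    simp
  | none =>
    simp only [PySem.List.slice_to_natCast, PySem.List.slice_from_natCast]
    rw [← take_index_eq, ← drop_index_eq, h]
    simp

-- ===== VERDICT (by name: the statement is the Claim_ definition above) =====
theorem split_sentence_spec : Claim_equal_split_sentence := by
  intro sentence _
  unfold Spec_split_sentence split_sentence
  rw [splitFold_init sentence [], alt_eq_splitAt]
  simp
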